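-- pv_equiv track=rewrite | github.com/DayeFubara16/PlayerCards | scripts/Position_Arbitrator.py | family_hint_from_sources
-- ===== SOURCE A (Python) =====
-- GROUP_MAP = {
--     "GK": "GK",
--     "CB": "CB",
--     "RB": "FB", "LB": "FB", "FB": "FB",
--     "RWB": "WB", "LWB": "WB", "WB": "WB",
--     "DM": "DM",
--     "CM": "CM",
--     "RM": "WM", "LM": "WM", "WM": "WM",
--     "AMC": "AM-C", "AM": "AM-C",
--     "AMR": "AM-W", "AML": "AM-W", "RW": "AM-W", "LW": "AM-W", "W": "AM-W",
--     "ST": "ST", "SS": "ST-SS",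
-- }
--
-- def position_group(code: str | None) -> str | None:
--     if not code:
--         return None
--     return GROUP_MAP.get(code, code)
--
-- def family_hint_from_sources(profile_code: str | None, match_pos: str | None, match_role: str | None) -> str | None:
--     groups = [position_group(c) for c in [profile_code, match_pos, match_role] if c]
--     if any(g in {"CB", "FB", "WB"} for g in groups):
--         return "DEF"
--     if any(g in {"DM", "CM", "AM-C", "AM-W", "WM"} for g in groups):
--         return "MID"
--     if any(g in {"ST", "ST-SS"} for g in groups):
--         return "ATT"
--     return None
-- ===== SOURCE B (Python) =====
-- # Numeric min-rank reduction: each code gets a priority rank (DEF=1, MID=2, ATT=3,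
-- # unknown/irrelevant=4); one fold keeps the minimum rank seen, and the answer is
-- # read off the rank at the end -- no family set, no priority scan.
-- _RANK = {
--     "CB": 1, "RB": 1, "LB": 1, "FB": 1, "RWB": 1, "LWB": 1, "WB": 1,
--     "DM": 2, "CM": 2, "RM": 2, "LM": 2, "WM": 2,
--     "AMC": 2, "AM": 2, "AMR": 2, "AML": 2, "RW": 2, "LW": 2, "W": 2,
--     "AM-C": 2, "AM-W": 2,
--     "ST": 3, "SS": 3, "ST-SS": 3,
-- }
-- _NAMES = ["DEF", "MID", "ATT"]
--
-- def family_hint_from_sources(profile_code, match_pos, match_role):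
--     best = 4
--     for c in (profile_code, match_pos, match_role):
--         if c:
--             r = _RANK.get(c, 4)
--             if r < best:
--                 best = r
--     return _NAMES[best - 1] if best < 4 else None
-- ===== Notes on version B (the rewrite author's own statement) =====
-- stated objective: alternative
-- what changed: Replaces the group-list plus three priority any()-over-set scans by a numeric min-reduction: each code maps to a priority rank (DEF=1, MID=2, ATT=3, other=4), one fold keeps the minimum rank, and the family name is indexed from the final rank.
import Mathlib
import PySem

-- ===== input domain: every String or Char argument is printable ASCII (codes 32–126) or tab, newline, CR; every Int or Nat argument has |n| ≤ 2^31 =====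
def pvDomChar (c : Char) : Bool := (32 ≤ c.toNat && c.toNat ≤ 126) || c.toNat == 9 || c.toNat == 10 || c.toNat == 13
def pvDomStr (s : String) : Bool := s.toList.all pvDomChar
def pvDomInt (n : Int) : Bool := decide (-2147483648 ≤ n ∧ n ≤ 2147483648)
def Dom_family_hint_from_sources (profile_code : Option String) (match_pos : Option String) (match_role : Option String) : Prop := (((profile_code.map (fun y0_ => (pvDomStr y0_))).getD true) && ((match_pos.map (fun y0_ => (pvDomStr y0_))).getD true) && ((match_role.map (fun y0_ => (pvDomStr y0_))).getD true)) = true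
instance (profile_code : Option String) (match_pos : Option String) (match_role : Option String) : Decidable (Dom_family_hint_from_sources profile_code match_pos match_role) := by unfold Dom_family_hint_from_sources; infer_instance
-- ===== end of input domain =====

-- B replaces A's group list plus three priority any()-over-set scans by a numeric
-- min-reduction over per-code priority ranks (DEF=1, MID=2, ATT=3, other=4), reading
-- the family name off the minimum rank (objective: alternative; same cost on 3 codes).

-- ===== PORT A =====
-- Python truthiness of an optional string ('if c:' / 'if not code:')
def pyTruthyStr (c : Option String) : Bool :=
  match c with
  | none => false
  | some s => !(s == "")

def GROUP_MAP : PySem.Dict String String := PySem.Dict.ofList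
  [("GK", "GK"), ("CB", "CB"), ("RB", "FB"), ("LB", "FB"), ("FB", "FB"),
   ("RWB", "WB"), ("LWB", "WB"), ("WB", "WB"), ("DM", "DM"), ("CM", "CM"),
   ("RM", "WM"), ("LM", "WM"), ("WM", "WM"), ("AMC", "AM-C"), ("AM", "AM-C"),
   ("AMR", "AM-W"), ("AML", "AM-W"), ("RW", "AM-W"), ("LW", "AM-W"), ("W", "AM-W"),
   ("ST", "ST"), ("SS", "ST-SS")]

def position_group (code : Option String) : Option String :=
  if !(pyTruthyStr code) then none
  else match code with
       | none => none
       | some s => some (GROUP_MAP.getD s s)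

def family_hint_from_sources (profile_code : Option String) (match_pos : Option String) (match_role : Option String) : Option String :=
  let groups := (([profile_code, match_pos, match_role]).filter pyTruthyStr).map position_group
  if groups.any (fun g => ([some "CB", some "FB", some "WB"] : List (Option String)).contains g) then some "DEF"
  else if groups.any (fun g => ([some "DM", some "CM", some "AM-C", some "AM-W", some "WM"] : List (Option String)).contains g) then some "MID"
  else if groups.any (fun g => ([some "ST", some "ST-SS"] : List (Option String)).contains g) then some "ATT"
  else none

-- ===== PORT B =====
def RANK : PySem.Dict String Int := PySem.Dict.ofList
  [("CB", 1), ("RB", 1), ("LB", 1), ("FB", 1), ("RWB", 1), ("LWB", 1), ("WB", 1),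
   ("DM", 2), ("CM", 2), ("RM", 2), ("LM", 2), ("WM", 2),
   ("AMC", 2), ("AM", 2), ("AMR", 2), ("AML", 2), ("RW", 2), ("LW", 2), ("W", 2),
   ("AM-C", 2), ("AM-W", 2),
   ("ST", 3), ("SS", 3), ("ST-SS", 3)]

def NAMES : List String := ["DEF", "MID", "ATT"]

-- loop body: 'if c: r = _RANK.get(c, 4); if r < best: best = r'
def stepB (best : Int) (c : Option String) : Int :=
  if pyTruthyStr c then
    match c with
    | none => best
    | some s =>
      let r := RANK.getD s 4
      if r < best then r else best
  else best

-- '_NAMES[best - 1]' is PySem.List.pyGet? (none = IndexError, unreachable here: the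
-- proofs below show best ∈ {1, 2, 3} whenever best < 4)
def family_hint_from_sources_alt (profile_code : Option String) (match_pos : Option String) (match_role : Option String) : Option String :=
  let best := ([profile_code, match_pos, match_role]).foldl stepB 4
  if best < 4 then PySem.List.pyGet? NAMES (best - 1) else none

-- ===== PRECONDITION & SPEC =====
def Spec_family_hint_from_sources (profile_code : Option String) (match_pos : Option String) (match_role : Option String) (out : Option String) : Prop := out = family_hint_from_sources_alt profile_code match_pos match_role
instance (profile_code : Option String) (match_pos : Option String) (match_role : Option String) (out : Option String) : Decidable (Spec_family_hint_from_sources profile_code match_pos match_role out) := by unfold Spec_family_hint_from_sources; infer_instance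

-- ===== CLAIM (what is proved, stated in full; the proofs are below) =====
def Claim_equal_family_hint_from_sources : Prop := ∀ (profile_code : Option String) (match_pos : Option String) (match_role : Option String), Dom_family_hint_from_sources profile_code match_pos match_role → Spec_family_hint_from_sources profile_code match_pos match_role (family_hint_from_sources profile_code match_pos match_role)

-- ===== LEMMAS AND PROOFS =====
lemma hGROUP : GROUP_MAP = PySem.Dict.mk
  [("GK", "GK"), ("CB", "CB"), ("RB", "FB"), ("LB", "FB"), ("FB", "FB"),
   ("RWB", "WB"), ("LWB", "WB"), ("WB", "WB"), ("DM", "DM"), ("CM", "CM"),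
   ("RM", "WM"), ("LM", "WM"), ("WM", "WM"), ("AMC", "AM-C"), ("AM", "AM-C"),
   ("AMR", "AM-W"), ("AML", "AM-W"), ("RW", "AM-W"), ("LW", "AM-W"), ("W", "AM-W"),
   ("ST", "ST"), ("SS", "ST-SS")] := by decide

lemma hRANK : RANK = PySem.Dict.mk
  [("CB", 1), ("RB", 1), ("LB", 1), ("FB", 1), ("RWB", 1), ("LWB", 1), ("WB", 1),
   ("DM", 2), ("CM", 2), ("RM", 2), ("LM", 2), ("WM", 2),
   ("AMC", 2), ("AM", 2), ("AMR", 2), ("AML", 2), ("RW", 2), ("LW", 2), ("W", 2),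
   ("AM-C", 2), ("AM-W", 2),
   ("ST", 3), ("SS", 3), ("ST-SS", 3)] := by decide

lemma rank_mem (s : String) (v : Int) (h : RANK.get? s = some v) : v = 1 ∨ v = 2 ∨ v = 3 := by
  rw [hRANK] at h
  simp only [PySem.Dict.get?, Option.map_eq_some_iff] at h
  obtain ⟨p, hp, hv⟩ := h
  have hm := List.mem_of_find?_eq_some hp
  fin_cases hm <;> simp_all

lemma rank_bounds (s : String) : 1 ≤ RANK.getD s 4 ∧ RANK.getD s 4 ≤ 4 := by
  rw [PySem.Dict.getD_eq_get?_getD]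
  rcases h : RANK.get? s with _ | v
  · simp
  · rcases rank_mem s v h with h' | h' | h' <;> simp [h'] <;> omega

lemma get?_eq_iff_getD (s : String) (k : Int) (hk : k ≠ 4) :
    RANK.get? s = some k ↔ RANK.getD s 4 = k := by
  rw [PySem.Dict.getD_eq_get?_getD]
  rcases h : RANK.get? s with _ | v
  · simp [Ne.symm hk]
  · simp

lemma fold_le (cs : List (Option String)) (b k : Int) :
    (cs.foldl stepB b ≤ k) ↔ (b ≤ k ∨ ∃ s, some s ∈ cs ∧ ¬ s = "" ∧ RANK.getD s 4 ≤ k) := by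
  induction cs generalizing b with
  | nil => simp
  | cons c t ih =>
    rw [List.foldl_cons, ih]
    cases c with
    | none => simp [stepB, pyTruthyStr]
    | some s =>
      by_cases hs : s = ""
      · subst hs; simp [stepB, pyTruthyStr]
      · have hstep : (stepB b (some s) ≤ k) ↔ (b ≤ k ∨ RANK.getD s 4 ≤ k) := by
          simp only [stepB, pyTruthyStr]
          split_ifs <;> simp_all <;> omega
        simp only [List.mem_cons]
        constructor
        · rintro (h | ⟨s', hm, hs', hf⟩)
          · rcases hstep.mp h with h' | h'
            · exact Or.inl h'
            · exact Or.inr ⟨s, Or.inl rfl, hs, h'⟩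
          · exact Or.inr ⟨s', Or.inr hm, hs', hf⟩
        · rintro (h | ⟨s', (h' | hm), hs', hf⟩)
          · exact Or.inl (hstep.mpr (Or.inl h))
          · obtain rfl : s' = s := Option.some.inj h'
            exact Or.inl (hstep.mpr (Or.inr hf))
          · exact Or.inr ⟨s', hm, hs', hf⟩

lemma fold_bounds (cs : List (Option String)) (b : Int) (hb : 1 ≤ b ∧ b ≤ 4) :
    1 ≤ cs.foldl stepB b ∧ cs.foldl stepB b ≤ 4 := by
  induction cs generalizing b with
  | nil => simpa
  | cons c t ih =>
    rw [List.foldl_cons]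
    apply ih
    cases c with
    | none => simpa [stepB, pyTruthyStr]
    | some s =>
      by_cases hs : s = ""
      · subst hs; simpa [stepB, pyTruthyStr]
      · have := rank_bounds s
        simp only [stepB, pyTruthyStr]
        split_ifs <;> simp_all <;> omega

lemma condAux (cs : List (Option String)) (lst : List (Option String)) (k : Int)
    (hfam : ∀ s, ¬ s = "" → (lst.contains (position_group (some s))) = (RANK.get? s == some k))
    (hk : k ≠ 4) :
    ((((cs.filter pyTruthyStr).map position_group).any (fun g => lst.contains g)) = true)
      ↔ ∃ s, some s ∈ cs ∧ ¬ s = "" ∧ RANK.getD s 4 = k := by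
  simp only [List.any_eq_true, List.mem_map, List.mem_filter]
  constructor
  · rintro ⟨g, ⟨c, ⟨hc, ht⟩, rfl⟩, hp⟩
    cases c with
    | none => simp [pyTruthyStr] at ht
    | some s =>
      have hs : ¬ s = "" := by simpa [pyTruthyStr] using ht
      refine ⟨s, hc, hs, ?_⟩
      rw [hfam s hs] at hp
      exact (get?_eq_iff_getD s k hk).mp (by simpa using hp)
  · rintro ⟨s, hc, hs, hf⟩
    refine ⟨position_group (some s), ⟨some s, ⟨hc, by simp [pyTruthyStr, hs]⟩, rfl⟩, ?_⟩
    rw [hfam s hs]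
    simp [(get?_eq_iff_getD s k hk).mpr hf]

set_option maxHeartbeats 1000000 in
lemma famDEF (s : String) (h : ¬ s = "") :
    (([some "CB", some "FB", some "WB"] : List (Option String)).contains (position_group (some s)))
      = (RANK.get? s == some 1) := by
  by_cases h0 : s = "GK"
  · subst h0; simp [hGROUP, hRANK, PySem.Dict.getD_eq_get?_getD, PySem.Dict.get?_mk_cons, PySem.Dict.get?, position_group, pyTruthyStr]
  by_cases h1 : s = "CB"
  · subst h1; simp [hGROUP, hRANK, PySem.Dict.getD_eq_get?_getD, PySem.Dict.get?_mk_cons, PySem.Dict.get?, position_group, pyTruthyStr]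
  by_cases h2 : s = "RB"
  · subst h2; simp [hGROUP, hRANK, PySem.Dict.getD_eq_get?_getD, PySem.Dict.get?_mk_cons, PySem.Dict.get?, position_group, pyTruthyStr]
  by_cases h3 : s = "LB"
  · subst h3; simp [hGROUP, hRANK, PySem.Dict.getD_eq_get?_getD, PySem.Dict.get?_mk_cons, PySem.Dict.get?, position_group, pyTruthyStr]
  by_cases h4 : s = "FB"
  · subst h4; simp [hGROUP, hRANK, PySem.Dict.getD_eq_get?_getD, PySem.Dict.get?_mk_cons, PySem.Dict.get?, position_group, pyTruthyStr]
  by_cases h5 : s = "RWB"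
  · subst h5; simp [hGROUP, hRANK, PySem.Dict.getD_eq_get?_getD, PySem.Dict.get?_mk_cons, PySem.Dict.get?, position_group, pyTruthyStr]
  by_cases h6 : s = "LWB"
  · subst h6; simp [hGROUP, hRANK, PySem.Dict.getD_eq_get?_getD, PySem.Dict.get?_mk_cons, PySem.Dict.get?, position_group, pyTruthyStr]
  by_cases h7 : s = "WB"
  · subst h7; simp [hGROUP, hRANK, PySem.Dict.getD_eq_get?_getD, PySem.Dict.get?_mk_cons, PySem.Dict.get?, position_group, pyTruthyStr]
  by_cases h8 : s = "DM"
  · subst h8; simp [hGROUP, hRANK, PySem.Dict.getD_eq_get?_getD, PySem.Dict.get?_mk_cons, PySem.Dict.get?, position_group, pyTruthyStr]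
  by_cases h9 : s = "CM"
  · subst h9; simp [hGROUP, hRANK, PySem.Dict.getD_eq_get?_getD, PySem.Dict.get?_mk_cons, PySem.Dict.get?, position_group, pyTruthyStr]
  by_cases h10 : s = "RM"
  · subst h10; simp [hGROUP, hRANK, PySem.Dict.getD_eq_get?_getD, PySem.Dict.get?_mk_cons, PySem.Dict.get?, position_group, pyTruthyStr]
  by_cases h11 : s = "LM"
  · subst h11; simp [hGROUP, hRANK, PySem.Dict.getD_eq_get?_getD, PySem.Dict.get?_mk_cons, PySem.Dict.get?, position_group, pyTruthyStr]
  by_cases h12 : s = "WM"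
  · subst h12; simp [hGROUP, hRANK, PySem.Dict.getD_eq_get?_getD, PySem.Dict.get?_mk_cons, PySem.Dict.get?, position_group, pyTruthyStr]
  by_cases h13 : s = "AMC"
  · subst h13; simp [hGROUP, hRANK, PySem.Dict.getD_eq_get?_getD, PySem.Dict.get?_mk_cons, PySem.Dict.get?, position_group, pyTruthyStr]
  by_cases h14 : s = "AM"
  · subst h14; simp [hGROUP, hRANK, PySem.Dict.getD_eq_get?_getD, PySem.Dict.get?_mk_cons, PySem.Dict.get?, position_group, pyTruthyStr]
  by_cases h15 : s = "AMR"
  · subst h15; simp [hGROUP, hRANK, PySem.Dict.getD_eq_get?_getD, PySem.Dict.get?_mk_cons, PySem.Dict.get?, position_group, pyTruthyStr]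
  by_cases h16 : s = "AML"
  · subst h16; simp [hGROUP, hRANK, PySem.Dict.getD_eq_get?_getD, PySem.Dict.get?_mk_cons, PySem.Dict.get?, position_group, pyTruthyStr]
  by_cases h17 : s = "RW"
  · subst h17; simp [hGROUP, hRANK, PySem.Dict.getD_eq_get?_getD, PySem.Dict.get?_mk_cons, PySem.Dict.get?, position_group, pyTruthyStr]
  by_cases h18 : s = "LW"
  · subst h18; simp [hGROUP, hRANK, PySem.Dict.getD_eq_get?_getD, PySem.Dict.get?_mk_cons, PySem.Dict.get?, position_group, pyTruthyStr]
  by_cases h19 : s = "W"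
  · subst h19; simp [hGROUP, hRANK, PySem.Dict.getD_eq_get?_getD, PySem.Dict.get?_mk_cons, PySem.Dict.get?, position_group, pyTruthyStr]
  by_cases h20 : s = "AM-C"
  · subst h20; simp [hGROUP, hRANK, PySem.Dict.getD_eq_get?_getD, PySem.Dict.get?_mk_cons, PySem.Dict.get?, position_group, pyTruthyStr]
  by_cases h21 : s = "AM-W"
  · subst h21; simp [hGROUP, hRANK, PySem.Dict.getD_eq_get?_getD, PySem.Dict.get?_mk_cons, PySem.Dict.get?, position_group, pyTruthyStr]
  by_cases h22 : s = "ST"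
  · subst h22; simp [hGROUP, hRANK, PySem.Dict.getD_eq_get?_getD, PySem.Dict.get?_mk_cons, PySem.Dict.get?, position_group, pyTruthyStr]
  by_cases h23 : s = "SS"
  · subst h23; simp [hGROUP, hRANK, PySem.Dict.getD_eq_get?_getD, PySem.Dict.get?_mk_cons, PySem.Dict.get?, position_group, pyTruthyStr]
  by_cases h24 : s = "ST-SS"
  · subst h24; simp [hGROUP, hRANK, PySem.Dict.getD_eq_get?_getD, PySem.Dict.get?_mk_cons, PySem.Dict.get?, position_group, pyTruthyStr]
  simp [hGROUP, hRANK, PySem.Dict.getD_eq_get?_getD, PySem.Dict.get?_mk_cons, PySem.Dict.get?, position_group, pyTruthyStr, h, beq_eq_false_iff_ne.mpr (Ne.symm h0), beq_eq_false_iff_ne.mpr h0, beq_eq_false_iff_ne.mpr (Ne.symm h1), beq_eq_false_iff_ne.mpr h1, beq_eq_false_iff_ne.mpr (Ne.symm h2), beq_eq_false_iff_ne.mpr h2, beq_eq_false_iff_ne.mpr (Ne.symm h3), beq_eq_false_iff_ne.mpr h3, beq_eq_false_iff_ne.mpr (Ne.symm h4), beq_eq_false_iff_ne.mpr h4, beq_eq_false_iff_ne.mpr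 (Ne.symm h5), beq_eq_false_iff_ne.mpr h5, beq_eq_false_iff_ne.mpr (Ne.symm h6), beq_eq_false_iff_ne.mpr h6, beq_eq_false_iff_ne.mpr (Ne.symm h7), beq_eq_false_iff_ne.mpr h7, beq_eq_false_iff_ne.mpr (Ne.symm h8), beq_eq_false_iff_ne.mpr h8, beq_eq_false_iff_ne.mpr (Ne.symm h9), beq_eq_false_iff_ne.mpr h9, beq_eq_false_iff_ne.mpr (Ne.symm h10), beq_eq_false_iff_ne.mpr h10, beq_eq_false_iff_ne.mpr (Ne.symm h11), beq_eq_false_iff_ne.mpr h11, beq_eq_false_iff_ne.mpr (Ne.symm h12), beq_eq_false_iff_ne.mpr h12, beq_eq_false_iff_ne.mpr (Ne.symm h13), beq_eq_false_iff_ne.mpr h13, beq_eq_false_iff_ne.mpr (Ne.symm h14), beq_eq_false_iff_ne.mpr h14, beq_eq_false_iff_ne.mpr (Ne.symm h15), beq_eq_false_iff_ne.mpr h15, beq_eq_false_iff_ne.mpr (Ne.symm h16), beq_eq_false_iff_ne.mpr h16, beq_eq_false_iff_ne.mpr (Ne.symm h17), beq_eq_false_iff_ne.mpr h17, beq_eq_false_iff_ne.mpr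 (Ne.symm h18), beq_eq_false_iff_ne.mpr h18, beq_eq_false_iff_ne.mpr (Ne.symm h19), beq_eq_false_iff_ne.mpr h19, beq_eq_false_iff_ne.mpr (Ne.symm h20), beq_eq_false_iff_ne.mpr h20, beq_eq_false_iff_ne.mpr (Ne.symm h21), beq_eq_false_iff_ne.mpr h21, beq_eq_false_iff_ne.mpr (Ne.symm h22), beq_eq_false_iff_ne.mpr h22, beq_eq_false_iff_ne.mpr (Ne.symm h23), beq_eq_false_iff_ne.mpr h23, beq_eq_false_iff_ne.mpr (Ne.symm h24), beq_eq_false_iff_ne.mpr h24]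
  tauto

set_option maxHeartbeats 1000000 in
lemma famMID (s : String) (h : ¬ s = "") :
    (([some "DM", some "CM", some "AM-C", some "AM-W", some "WM"] : List (Option String)).contains (position_group (some s)))
      = (RANK.get? s == some 2) := by
  by_cases h0 : s = "GK"
  · subst h0; simp [hGROUP, hRANK, PySem.Dict.getD_eq_get?_getD, PySem.Dict.get?_mk_cons, PySem.Dict.get?, position_group, pyTruthyStr]
  by_cases h1 : s = "CB"
  · subst h1; simp [hGROUP, hRANK, PySem.Dict.getD_eq_get?_getD, PySem.Dict.get?_mk_cons, PySem.Dict.get?, position_group, pyTruthyStr]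
  by_cases h2 : s = "RB"
  · subst h2; simp [hGROUP, hRANK, PySem.Dict.getD_eq_get?_getD, PySem.Dict.get?_mk_cons, PySem.Dict.get?, position_group, pyTruthyStr]
  by_cases h3 : s = "LB"
  · subst h3; simp [hGROUP, hRANK, PySem.Dict.getD_eq_get?_getD, PySem.Dict.get?_mk_cons, PySem.Dict.get?, position_group, pyTruthyStr]
  by_cases h4 : s = "FB"
  · subst h4; simp [hGROUP, hRANK, PySem.Dict.getD_eq_get?_getD, PySem.Dict.get?_mk_cons, PySem.Dict.get?, position_group, pyTruthyStr]
  by_cases h5 : s = "RWB"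
  · subst h5; simp [hGROUP, hRANK, PySem.Dict.getD_eq_get?_getD, PySem.Dict.get?_mk_cons, PySem.Dict.get?, position_group, pyTruthyStr]
  by_cases h6 : s = "LWB"
  · subst h6; simp [hGROUP, hRANK, PySem.Dict.getD_eq_get?_getD, PySem.Dict.get?_mk_cons, PySem.Dict.get?, position_group, pyTruthyStr]
  by_cases h7 : s = "WB"
  · subst h7; simp [hGROUP, hRANK, PySem.Dict.getD_eq_get?_getD, PySem.Dict.get?_mk_cons, PySem.Dict.get?, position_group, pyTruthyStr]
  by_cases h8 : s = "DM"
  · subst h8; simp [hGROUP, hRANK, PySem.Dict.getD_eq_get?_getD, PySem.Dict.get?_mk_cons, PySem.Dict.get?, position_group, pyTruthyStr]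
  by_cases h9 : s = "CM"
  · subst h9; simp [hGROUP, hRANK, PySem.Dict.getD_eq_get?_getD, PySem.Dict.get?_mk_cons, PySem.Dict.get?, position_group, pyTruthyStr]
  by_cases h10 : s = "RM"
  · subst h10; simp [hGROUP, hRANK, PySem.Dict.getD_eq_get?_getD, PySem.Dict.get?_mk_cons, PySem.Dict.get?, position_group, pyTruthyStr]
  by_cases h11 : s = "LM"
  · subst h11; simp [hGROUP, hRANK, PySem.Dict.getD_eq_get?_getD, PySem.Dict.get?_mk_cons, PySem.Dict.get?, position_group, pyTruthyStr]
  by_cases h12 : s = "WM"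
  · subst h12; simp [hGROUP, hRANK, PySem.Dict.getD_eq_get?_getD, PySem.Dict.get?_mk_cons, PySem.Dict.get?, position_group, pyTruthyStr]
  by_cases h13 : s = "AMC"
  · subst h13; simp [hGROUP, hRANK, PySem.Dict.getD_eq_get?_getD, PySem.Dict.get?_mk_cons, PySem.Dict.get?, position_group, pyTruthyStr]
  by_cases h14 : s = "AM"
  · subst h14; simp [hGROUP, hRANK, PySem.Dict.getD_eq_get?_getD, PySem.Dict.get?_mk_cons, PySem.Dict.get?, position_group, pyTruthyStr]
  by_cases h15 : s = "AMR"
  · subst h15; simp [hGROUP, hRANK, PySem.Dict.getD_eq_get?_getD, PySem.Dict.get?_mk_cons, PySem.Dict.get?, position_group, pyTruthyStr]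
  by_cases h16 : s = "AML"
  · subst h16; simp [hGROUP, hRANK, PySem.Dict.getD_eq_get?_getD, PySem.Dict.get?_mk_cons, PySem.Dict.get?, position_group, pyTruthyStr]
  by_cases h17 : s = "RW"
  · subst h17; simp [hGROUP, hRANK, PySem.Dict.getD_eq_get?_getD, PySem.Dict.get?_mk_cons, PySem.Dict.get?, position_group, pyTruthyStr]
  by_cases h18 : s = "LW"
  · subst h18; simp [hGROUP, hRANK, PySem.Dict.getD_eq_get?_getD, PySem.Dict.get?_mk_cons, PySem.Dict.get?, position_group, pyTruthyStr]
  by_cases h19 : s = "W"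
  · subst h19; simp [hGROUP, hRANK, PySem.Dict.getD_eq_get?_getD, PySem.Dict.get?_mk_cons, PySem.Dict.get?, position_group, pyTruthyStr]
  by_cases h20 : s = "AM-C"
  · subst h20; simp [hGROUP, hRANK, PySem.Dict.getD_eq_get?_getD, PySem.Dict.get?_mk_cons, PySem.Dict.get?, position_group, pyTruthyStr]
  by_cases h21 : s = "AM-W"
  · subst h21; simp [hGROUP, hRANK, PySem.Dict.getD_eq_get?_getD, PySem.Dict.get?_mk_cons, PySem.Dict.get?, position_group, pyTruthyStr]
  by_cases h22 : s = "ST"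
  · subst h22; simp [hGROUP, hRANK, PySem.Dict.getD_eq_get?_getD, PySem.Dict.get?_mk_cons, PySem.Dict.get?, position_group, pyTruthyStr]
  by_cases h23 : s = "SS"
  · subst h23; simp [hGROUP, hRANK, PySem.Dict.getD_eq_get?_getD, PySem.Dict.get?_mk_cons, PySem.Dict.get?, position_group, pyTruthyStr]
  by_cases h24 : s = "ST-SS"
  · subst h24; simp [hGROUP, hRANK, PySem.Dict.getD_eq_get?_getD, PySem.Dict.get?_mk_cons, PySem.Dict.get?, position_group, pyTruthyStr]
  simp [hGROUP, hRANK, PySem.Dict.getD_eq_get?_getD, PySem.Dict.get?_mk_cons, PySem.Dict.get?, position_group, pyTruthyStr, h, beq_eq_false_iff_ne.mpr (Ne.symm h0), beq_eq_false_iff_ne.mpr h0, beq_eq_false_iff_ne.mpr (Ne.symm h1), beq_eq_false_iff_ne.mpr h1, beq_eq_false_iff_ne.mpr (Ne.symm h2), beq_eq_false_iff_ne.mpr h2, beq_eq_false_iff_ne.mpr (Ne.symm h3), beq_eq_false_iff_ne.mpr h3, beq_eq_false_iff_ne.mpr (Ne.symm h4), beq_eq_false_iff_ne.mpr h4, beq_eq_false_iff_ne.mpr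 (Ne.symm h5), beq_eq_false_iff_ne.mpr h5, beq_eq_false_iff_ne.mpr (Ne.symm h6), beq_eq_false_iff_ne.mpr h6, beq_eq_false_iff_ne.mpr (Ne.symm h7), beq_eq_false_iff_ne.mpr h7, beq_eq_false_iff_ne.mpr (Ne.symm h8), beq_eq_false_iff_ne.mpr h8, beq_eq_false_iff_ne.mpr (Ne.symm h9), beq_eq_false_iff_ne.mpr h9, beq_eq_false_iff_ne.mpr (Ne.symm h10), beq_eq_false_iff_ne.mpr h10, beq_eq_false_iff_ne.mpr (Ne.symm h11), beq_eq_false_iff_ne.mpr h11, beq_eq_false_iff_ne.mpr (Ne.symm h12), beq_eq_false_iff_ne.mpr h12, beq_eq_false_iff_ne.mpr (Ne.symm h13), beq_eq_false_iff_ne.mpr h13, beq_eq_false_iff_ne.mpr (Ne.symm h14), beq_eq_false_iff_ne.mpr h14, beq_eq_false_iff_ne.mpr (Ne.symm h15), beq_eq_false_iff_ne.mpr h15, beq_eq_false_iff_ne.mpr (Ne.symm h16), beq_eq_false_iff_ne.mpr h16, beq_eq_false_iff_ne.mpr (Ne.symm h17), beq_eq_false_iff_ne.mpr h17, beq_eq_false_iff_ne.mpr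 (Ne.symm h18), beq_eq_false_iff_ne.mpr h18, beq_eq_false_iff_ne.mpr (Ne.symm h19), beq_eq_false_iff_ne.mpr h19, beq_eq_false_iff_ne.mpr (Ne.symm h20), beq_eq_false_iff_ne.mpr h20, beq_eq_false_iff_ne.mpr (Ne.symm h21), beq_eq_false_iff_ne.mpr h21, beq_eq_false_iff_ne.mpr (Ne.symm h22), beq_eq_false_iff_ne.mpr h22, beq_eq_false_iff_ne.mpr (Ne.symm h23), beq_eq_false_iff_ne.mpr h23, beq_eq_false_iff_ne.mpr (Ne.symm h24), beq_eq_false_iff_ne.mpr h24]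
  tauto

set_option maxHeartbeats 1000000 in
lemma famATT (s : String) (h : ¬ s = "") :
    (([some "ST", some "ST-SS"] : List (Option String)).contains (position_group (some s)))
      = (RANK.get? s == some 3) := by
  by_cases h0 : s = "GK"
  · subst h0; simp [hGROUP, hRANK, PySem.Dict.getD_eq_get?_getD, PySem.Dict.get?_mk_cons, PySem.Dict.get?, position_group, pyTruthyStr]
  by_cases h1 : s = "CB"
  · subst h1; simp [hGROUP, hRANK, PySem.Dict.getD_eq_get?_getD, PySem.Dict.get?_mk_cons, PySem.Dict.get?, position_group, pyTruthyStr]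
  by_cases h2 : s = "RB"
  · subst h2; simp [hGROUP, hRANK, PySem.Dict.getD_eq_get?_getD, PySem.Dict.get?_mk_cons, PySem.Dict.get?, position_group, pyTruthyStr]
  by_cases h3 : s = "LB"
  · subst h3; simp [hGROUP, hRANK, PySem.Dict.getD_eq_get?_getD, PySem.Dict.get?_mk_cons, PySem.Dict.get?, position_group, pyTruthyStr]
  by_cases h4 : s = "FB"
  · subst h4; simp [hGROUP, hRANK, PySem.Dict.getD_eq_get?_getD, PySem.Dict.get?_mk_cons, PySem.Dict.get?, position_group, pyTruthyStr]
  by_cases h5 : s = "RWB"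
  · subst h5; simp [hGROUP, hRANK, PySem.Dict.getD_eq_get?_getD, PySem.Dict.get?_mk_cons, PySem.Dict.get?, position_group, pyTruthyStr]
  by_cases h6 : s = "LWB"
  · subst h6; simp [hGROUP, hRANK, PySem.Dict.getD_eq_get?_getD, PySem.Dict.get?_mk_cons, PySem.Dict.get?, position_group, pyTruthyStr]
  by_cases h7 : s = "WB"
  · subst h7; simp [hGROUP, hRANK, PySem.Dict.getD_eq_get?_getD, PySem.Dict.get?_mk_cons, PySem.Dict.get?, position_group, pyTruthyStr]
  by_cases h8 : s = "DM"
  · subst h8; simp [hGROUP, hRANK, PySem.Dict.getD_eq_get?_getD, PySem.Dict.get?_mk_cons, PySem.Dict.get?, position_group, pyTruthyStr]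
  by_cases h9 : s = "CM"
  · subst h9; simp [hGROUP, hRANK, PySem.Dict.getD_eq_get?_getD, PySem.Dict.get?_mk_cons, PySem.Dict.get?, position_group, pyTruthyStr]
  by_cases h10 : s = "RM"
  · subst h10; simp [hGROUP, hRANK, PySem.Dict.getD_eq_get?_getD, PySem.Dict.get?_mk_cons, PySem.Dict.get?, position_group, pyTruthyStr]
  by_cases h11 : s = "LM"
  · subst h11; simp [hGROUP, hRANK, PySem.Dict.getD_eq_get?_getD, PySem.Dict.get?_mk_cons, PySem.Dict.get?, position_group, pyTruthyStr]
  by_cases h12 : s = "WM"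
  · subst h12; simp [hGROUP, hRANK, PySem.Dict.getD_eq_get?_getD, PySem.Dict.get?_mk_cons, PySem.Dict.get?, position_group, pyTruthyStr]
  by_cases h13 : s = "AMC"
  · subst h13; simp [hGROUP, hRANK, PySem.Dict.getD_eq_get?_getD, PySem.Dict.get?_mk_cons, PySem.Dict.get?, position_group, pyTruthyStr]
  by_cases h14 : s = "AM"
  · subst h14; simp [hGROUP, hRANK, PySem.Dict.getD_eq_get?_getD, PySem.Dict.get?_mk_cons, PySem.Dict.get?, position_group, pyTruthyStr]
  by_cases h15 : s = "AMR"
  · subst h15; simp [hGROUP, hRANK, PySem.Dict.getD_eq_get?_getD, PySem.Dict.get?_mk_cons, PySem.Dict.get?, position_group, pyTruthyStr]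
  by_cases h16 : s = "AML"
  · subst h16; simp [hGROUP, hRANK, PySem.Dict.getD_eq_get?_getD, PySem.Dict.get?_mk_cons, PySem.Dict.get?, position_group, pyTruthyStr]
  by_cases h17 : s = "RW"
  · subst h17; simp [hGROUP, hRANK, PySem.Dict.getD_eq_get?_getD, PySem.Dict.get?_mk_cons, PySem.Dict.get?, position_group, pyTruthyStr]
  by_cases h18 : s = "LW"
  · subst h18; simp [hGROUP, hRANK, PySem.Dict.getD_eq_get?_getD, PySem.Dict.get?_mk_cons, PySem.Dict.get?, position_group, pyTruthyStr]
  by_cases h19 : s = "W"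
  · subst h19; simp [hGROUP, hRANK, PySem.Dict.getD_eq_get?_getD, PySem.Dict.get?_mk_cons, PySem.Dict.get?, position_group, pyTruthyStr]
  by_cases h20 : s = "AM-C"
  · subst h20; simp [hGROUP, hRANK, PySem.Dict.getD_eq_get?_getD, PySem.Dict.get?_mk_cons, PySem.Dict.get?, position_group, pyTruthyStr]
  by_cases h21 : s = "AM-W"
  · subst h21; simp [hGROUP, hRANK, PySem.Dict.getD_eq_get?_getD, PySem.Dict.get?_mk_cons, PySem.Dict.get?, position_group, pyTruthyStr]
  by_cases h22 : s = "ST"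
  · subst h22; simp [hGROUP, hRANK, PySem.Dict.getD_eq_get?_getD, PySem.Dict.get?_mk_cons, PySem.Dict.get?, position_group, pyTruthyStr]
  by_cases h23 : s = "SS"
  · subst h23; simp [hGROUP, hRANK, PySem.Dict.getD_eq_get?_getD, PySem.Dict.get?_mk_cons, PySem.Dict.get?, position_group, pyTruthyStr]
  by_cases h24 : s = "ST-SS"
  · subst h24; simp [hGROUP, hRANK, PySem.Dict.getD_eq_get?_getD, PySem.Dict.get?_mk_cons, PySem.Dict.get?, position_group, pyTruthyStr]
  simp [hGROUP, hRANK, PySem.Dict.getD_eq_get?_getD, PySem.Dict.get?_mk_cons, PySem.Dict.get?, position_group, pyTruthyStr, h, beq_eq_false_iff_ne.mpr (Ne.symm h0), beq_eq_false_iff_ne.mpr h0, beq_eq_false_iff_ne.mpr (Ne.symm h1), beq_eq_false_iff_ne.mpr h1, beq_eq_false_iff_ne.mpr (Ne.symm h2), beq_eq_false_iff_ne.mpr h2, beq_eq_false_iff_ne.mpr (Ne.symm h3), beq_eq_false_iff_ne.mpr h3, beq_eq_false_iff_ne.mpr (Ne.symm h4), beq_eq_false_iff_ne.mpr h4, beq_eq_false_iff_ne.mpr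 (Ne.symm h5), beq_eq_false_iff_ne.mpr h5, beq_eq_false_iff_ne.mpr (Ne.symm h6), beq_eq_false_iff_ne.mpr h6, beq_eq_false_iff_ne.mpr (Ne.symm h7), beq_eq_false_iff_ne.mpr h7, beq_eq_false_iff_ne.mpr (Ne.symm h8), beq_eq_false_iff_ne.mpr h8, beq_eq_false_iff_ne.mpr (Ne.symm h9), beq_eq_false_iff_ne.mpr h9, beq_eq_false_iff_ne.mpr (Ne.symm h10), beq_eq_false_iff_ne.mpr h10, beq_eq_false_iff_ne.mpr (Ne.symm h11), beq_eq_false_iff_ne.mpr h11, beq_eq_false_iff_ne.mpr (Ne.symm h12), beq_eq_false_iff_ne.mpr h12, beq_eq_false_iff_ne.mpr (Ne.symm h13), beq_eq_false_iff_ne.mpr h13, beq_eq_false_iff_ne.mpr (Ne.symm h14), beq_eq_false_iff_ne.mpr h14, beq_eq_false_iff_ne.mpr (Ne.symm h15), beq_eq_false_iff_ne.mpr h15, beq_eq_false_iff_ne.mpr (Ne.symm h16), beq_eq_false_iff_ne.mpr h16, beq_eq_false_iff_ne.mpr (Ne.symm h17), beq_eq_false_iff_ne.mpr h17, beq_eq_false_iff_ne.mpr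 (Ne.symm h18), beq_eq_false_iff_ne.mpr h18, beq_eq_false_iff_ne.mpr (Ne.symm h19), beq_eq_false_iff_ne.mpr h19, beq_eq_false_iff_ne.mpr (Ne.symm h20), beq_eq_false_iff_ne.mpr h20, beq_eq_false_iff_ne.mpr (Ne.symm h21), beq_eq_false_iff_ne.mpr h21, beq_eq_false_iff_ne.mpr (Ne.symm h22), beq_eq_false_iff_ne.mpr h22, beq_eq_false_iff_ne.mpr (Ne.symm h23), beq_eq_false_iff_ne.mpr h23, beq_eq_false_iff_ne.mpr (Ne.symm h24), beq_eq_false_iff_ne.mpr h24]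
  tauto

-- ===== VERDICT (by name: the statement is the Claim_ definition above) =====
theorem family_hint_from_sources_spec : Claim_equal_family_hint_from_sources := by
  intro pc mp mr _
  unfold Spec_family_hint_from_sources
  set cs : List (Option String) := [pc, mp, mr] with hcs
  have hD := condAux cs _ 1 famDEF (by norm_num)
  have hM := condAux cs _ 2 famMID (by norm_num)
  have hA := condAux cs _ 3 famATT (by norm_num)
  have hb := fold_bounds cs 4 (by norm_num)
  set best := cs.foldl stepB 4 with hbest
  have h1 : (best ≤ 1) ↔ ∃ s, some s ∈ cs ∧ ¬ s = "" ∧ RANK.getD s 4 ≤ 1 := by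
    rw [hbest, fold_le]; norm_num
  have h2 : (best ≤ 2) ↔ ∃ s, some s ∈ cs ∧ ¬ s = "" ∧ RANK.getD s 4 ≤ 2 := by
    rw [hbest, fold_le]; norm_num
  have h3 : (best ≤ 3) ↔ ∃ s, some s ∈ cs ∧ ¬ s = "" ∧ RANK.getD s 4 ≤ 3 := by
    rw [hbest, fold_le]; norm_num
  simp only [family_hint_from_sources, family_hint_from_sources_alt, ← hcs, ← hbest]
  by_cases c1 : ∃ s, some s ∈ cs ∧ ¬ s = "" ∧ RANK.getD s 4 = 1
  · have hb1 : best = 1 := by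
      have : best ≤ 1 := h1.mpr (by obtain ⟨s, a, b, c⟩ := c1; exact ⟨s, a, b, le_of_eq c⟩)
      omega
    rw [if_pos (hD.mpr c1), hb1]
    simp [NAMES, PySem.List.pyGet?, PySem.List.pyIdx?]
  · rw [if_neg (by rw [hD]; exact c1)]
    have nb1 : ¬ best ≤ 1 := fun h => c1 (by
      obtain ⟨s, a, b, c⟩ := h1.mp h
      exact ⟨s, a, b, le_antisymm c (rank_bounds s).1⟩)
    by_cases c2 : ∃ s, some s ∈ cs ∧ ¬ s = "" ∧ RANK.getD s 4 = 2
    · have hb2 : best = 2 := by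
        have : best ≤ 2 := h2.mpr (by obtain ⟨s, a, b, c⟩ := c2; exact ⟨s, a, b, le_of_eq c⟩)
        omega
      rw [if_pos (hM.mpr c2), hb2]
      simp [NAMES, PySem.List.pyGet?, PySem.List.pyIdx?]
    · rw [if_neg (by rw [hM]; exact c2)]
      have nb2 : ¬ best ≤ 2 := fun h => (by
        obtain ⟨s, a, b, c⟩ := h2.mp h
        have := (rank_bounds s).1
        rcases (by omega : RANK.getD s 4 = 1 ∨ RANK.getD s 4 = 2) with h' | h'
        · exact c1 ⟨s, a, b, h'⟩
        · exact c2 ⟨s, a, b, h'⟩)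
      by_cases c3 : ∃ s, some s ∈ cs ∧ ¬ s = "" ∧ RANK.getD s 4 = 3
      · have hb3 : best = 3 := by
          have : best ≤ 3 := h3.mpr (by obtain ⟨s, a, b, c⟩ := c3; exact ⟨s, a, b, le_of_eq c⟩)
          omega
        rw [if_pos (hA.mpr c3), hb3]
        simp [NAMES, PySem.List.pyGet?, PySem.List.pyIdx?]
      · rw [if_neg (by rw [hA]; exact c3)]
        have nb3 : ¬ best ≤ 3 := fun h => (by
          obtain ⟨s, a, b, c⟩ := h3.mp h
          have := (rank_bounds s).1
          rcases (by omega : RANK.getD s 4 = 1 ∨ RANK.getD s 4 = 2 ∨ RANK.getD s 4 = 3) with h' | h' | h'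
          · exact c1 ⟨s, a, b, h'⟩
          · exact c2 ⟨s, a, b, h'⟩
          · exact c3 ⟨s, a, b, h'⟩)
        rw [if_neg (by omega)]
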